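-- pv_equiv track=rewrite | github.com/SlayZ121/robinson_mask | main.py | apply
-- ===== SOURCE A (Python) =====
-- ROBINSON_MASKS = [
--     [[-1, 0, 1], [-2, 0, 2], [-1, 0, 1]],
--     [[0, 1, 2], [-1, 0, 1], [-2, -1, 0]],
--     [[1, 2, 1], [0, 0, 0], [-1, -2, -1]],
--     [[2, 1, 0], [1, 0, -1], [0, -1, -2]],
--     [[1, 0, -1], [2, 0, -2], [1, 0, -1]],
--     [[0, -1, -2], [1, 0, -1], [2, 1, 0]],
--     [[-1, -2, -1], [0, 0, 0], [1, 2, 1]],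
--     [[-2, -1, 0], [-1, 0, 1], [0, 1, 2]],
-- ]
--
-- def apply(image, width, height):
--     edge_image = [[0 for _ in range(width)] for _ in range(height)]
--     for y in range(1, height - 1):
--         for x in range(1, width - 1):
--             max_gradient = 0
--             for mask in ROBINSON_MASKS:
--                 gradient = 0
--                 for dy in range(-1, 2):
--                     for dx in range(-1, 2):
--                         gradient += image[y + dy][x + dx] * mask[dy + 1][dx + 1]
--                 max_gradient = max(max_gradient, abs(gradient))
--             edge_image[y][x] = min(255, max_gradient)
--     return edge_image
-- ===== SOURCE B (Python) =====
-- _RING_OFFSETS = [(-1, -1), (-1, 0), (-1, 1), (0, 1), (1, 1), (1, 0), (1, -1), (0, -1)]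
-- _W = [-1, 0, 1, 2, 1, 0, -1, -2]
--
--
-- def apply(image, width, height):
--     def pixel(y, x):
--         ring = [image[y + dy][x + dx] for dy, dx in _RING_OFFSETS]
--         best = 0
--         for r in range(8):
--             g = sum(ring[(i - r) % 8] * w for i, w in enumerate(_W))
--             best = max(best, abs(g))
--         return min(255, best)
--
--     return [[pixel(y, x) if 1 <= y <= height - 2 and 1 <= x <= width - 2 else 0
--              for x in range(width)] for y in range(height)]
-- ===== Notes on version B (the rewrite author's own statement) =====
-- stated objective: alternative
-- what changed: B replaces the 8 hard-coded 3x3 Robinson mask tables by the 8 cyclic rotations of a single weight vector applied to the ring of 8 neighbours, and builds the output grid directly by nested comprehension instead of allocating a zero grid and mutating it entry by entry.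
import Mathlib
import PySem

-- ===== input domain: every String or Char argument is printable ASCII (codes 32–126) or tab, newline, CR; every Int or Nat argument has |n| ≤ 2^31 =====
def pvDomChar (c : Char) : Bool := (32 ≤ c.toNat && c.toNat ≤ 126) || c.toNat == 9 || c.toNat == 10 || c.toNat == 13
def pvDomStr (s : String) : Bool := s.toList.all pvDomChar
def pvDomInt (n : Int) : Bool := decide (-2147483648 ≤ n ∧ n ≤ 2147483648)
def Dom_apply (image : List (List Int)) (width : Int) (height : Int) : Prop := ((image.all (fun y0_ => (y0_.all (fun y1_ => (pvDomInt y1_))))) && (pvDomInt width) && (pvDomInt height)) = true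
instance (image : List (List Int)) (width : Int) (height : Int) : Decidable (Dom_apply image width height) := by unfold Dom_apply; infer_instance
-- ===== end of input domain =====

-- B replaces the 8 hard-coded Robinson mask tables by cyclic rotations of one weight
-- vector over the neighbour ring, and builds the output grid directly instead of
-- mutating a zero grid (objective: alternative decomposition, same cost).

-- ===== PORT A =====
def ROBINSON_MASKS : List (List (List Int)) :=
  [ [[-1, 0, 1], [-2, 0, 2], [-1, 0, 1]],
    [[0, 1, 2], [-1, 0, 1], [-2, -1, 0]],
    [[1, 2, 1], [0, 0, 0], [-1, -2, -1]],
    [[2, 1, 0], [1, 0, -1], [0, -1, -2]],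
    [[1, 0, -1], [2, 0, -2], [1, 0, -1]],
    [[0, -1, -2], [1, 0, -1], [2, 1, 0]],
    [[-1, -2, -1], [0, 0, 0], [1, 2, 1]],
    [[-2, -1, 0], [-1, 0, 1], [0, 1, 2]] ]

-- the body of A's x-loop: the per-pixel value (8 masks, 3x3 window, A's order)
def pixelA (image : List (List Int)) (y x : Int) : Int :=
  min 255 (ROBINSON_MASKS.foldl (fun mg mask =>
    max mg |(PySem.List.pyRange (-1) 2 1).foldl (fun g dy =>
      (PySem.List.pyRange (-1) 2 1).foldl (fun g dx =>
        g + (PySem.List.pyGetD (PySem.List.pyGetD image (y + dy) []) (x + dx) 0) *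
            (PySem.List.pyGetD (PySem.List.pyGetD mask (dy + 1) []) (dx + 1) 0)) g) 0|) 0)

-- edge_image starts as a height x width zero grid and is mutated entry by entry
def apply (image : List (List Int)) (width : Int) (height : Int) : List (List Int) :=
  (PySem.List.pyRange 1 (height - 1) 1).foldl (fun grid y =>
    (PySem.List.pyRange 1 (width - 1) 1).foldl (fun grid x =>
      PySem.List.pySetD grid y
        (PySem.List.pySetD (PySem.List.pyGetD grid y []) x (pixelA image y x))) grid)
    ((PySem.List.pyRange 0 height 1).map
      (fun _ => (PySem.List.pyRange 0 width 1).map (fun _ => (0 : Int))))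

-- ===== PORT B =====
def ringOffsets : List (Int × Int) :=
  [(-1, -1), (-1, 0), (-1, 1), (0, 1), (1, 1), (1, 0), (1, -1), (0, -1)]

def Wvec : List Int := [-1, 0, 1, 2, 1, 0, -1, -2]

def pixelB (image : List (List Int)) (y x : Int) : Int :=
  let ring := ringOffsets.map (fun p =>
    PySem.List.pyGetD (PySem.List.pyGetD image (y + p.1) []) (x + p.2) 0)
  let best := (PySem.List.pyRange 0 8 1).foldl (fun best r =>
    max best |((PySem.List.enumerate Wvec 0).map (fun iw =>
      PySem.List.pyGetD ring (PySem.Int.mod (iw.1 - r) 8) 0 * iw.2)).sum|) 0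
  min 255 best

def apply_alt (image : List (List Int)) (width : Int) (height : Int) : List (List Int) :=
  (PySem.List.pyRange 0 height 1).map (fun y =>
    (PySem.List.pyRange 0 width 1).map (fun x =>
      if 1 ≤ y ∧ y ≤ height - 2 ∧ 1 ≤ x ∧ x ≤ width - 2 then pixelB image y x else 0))

-- ===== PRECONDITION & SPEC =====
-- Pre_ excludes exactly the inputs where Python A raises IndexError: when both interior
-- loops are non-empty (height ≥ 3 and width ≥ 3) the image must supply at least
-- `height` rows whose first `height` rows have at least `width` entries each.
def Pre_apply (image : List (List Int)) (width : Int) (height : Int) : Prop :=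
  (3 ≤ height ∧ 3 ≤ width) →
    (height ≤ image.length ∧ ∀ r ∈ image.take height.toNat, width ≤ r.length)

instance (image : List (List Int)) (width : Int) (height : Int) : Decidable (Pre_apply image width height) := by unfold Pre_apply; infer_instance

def pvWitness_apply : List (List Int) × Int × Int :=
  ([[1, 2, 3], [4, 5, 6], [7, 8, 9]], 3, 3)

def Spec_apply (image : List (List Int)) (width : Int) (height : Int) (out : List (List Int)) : Prop := out = apply_alt image width height
instance (image : List (List Int)) (width : Int) (height : Int) (out : List (List Int)) : Decidable (Spec_apply image width height out) := by unfold Spec_apply; infer_instance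

-- ===== CLAIM (what is proved, stated in full; the proofs are below) =====
def Claim_equal_apply : Prop := ∀ (image : List (List Int)) (width : Int) (height : Int), Dom_apply image width height → Pre_apply image width height → Spec_apply image width height (apply image width height)

-- ===== LEMMAS AND PROOFS =====

-- the 8 Robinson masks are exactly the 8 rotations of B's weight vector on the ring
set_option maxHeartbeats 2000000 in
theorem pixel_eq (image : List (List Int)) (y x : Int) :
    pixelA image y x = pixelB image y x := by
  have h1 : PySem.List.pyRange (-1) 2 1 = [-1, 0, 1] := by decide
  have h2 : PySem.List.pyRange 0 8 1 = [0, 1, 2, 3, 4, 5, 6, 7] := by decide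
  simp [pixelA, pixelB, ROBINSON_MASKS, ringOffsets, Wvec, h1, h2,
        PySem.List.enumerate, PySem.Int.mod, PySem.List.pyGetD]
  ring_nf

theorem setD_getD_self (g : List (List Int)) (y : Int) (hy : 0 ≤ y) :
    PySem.List.pySetD g y (PySem.List.pyGetD g y []) = g := by
  rw [PySem.List.pySetD_of_nonneg _ _ hy, PySem.List.pyGetD_of_nonneg _ _ hy]
  by_cases h : y.toNat < g.length
  · rw [List.getD_eq_getElem?_getD, List.getElem?_eq_getElem h]
    exact List.set_getElem_self h
  · exact List.set_eq_of_length_le (by omega)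

theorem getD_setD_inner (g : List (List Int)) (y x v : Int)
    (hy : 0 ≤ y) (hx : 0 ≤ x) :
    PySem.List.pyGetD
        (PySem.List.pySetD g y
          (PySem.List.pySetD (PySem.List.pyGetD g y []) x v)) y []
      = PySem.List.pySetD (PySem.List.pyGetD g y []) x v := by
  by_cases h : y.toNat < g.length
  · rw [PySem.List.pySetD_of_nonneg _ _ hy, PySem.List.pyGetD_of_nonneg _ _ hy,
        List.getD_eq_getElem?_getD, List.getElem?_set]
    simp [h]
  · rw [PySem.List.pySetD_of_nonneg _ _ hy, List.set_eq_of_length_le (by omega)]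
    have hg : PySem.List.pyGetD g y ([] : List Int) = [] := by
      rw [PySem.List.pyGetD_of_nonneg _ _ hy, List.getD_eq_getElem?_getD,
          List.getElem?_eq_none (by omega)]
      rfl
    rw [hg, PySem.List.pySetD_of_nonneg _ _ hx]
    rfl

theorem pySetD_overwrite (g : List (List Int)) (y : Int) (a b : List Int) (hy : 0 ≤ y) :
    PySem.List.pySetD (PySem.List.pySetD g y a) y b = PySem.List.pySetD g y b := by
  rw [PySem.List.pySetD_of_nonneg _ _ hy, PySem.List.pySetD_of_nonneg _ _ hy,
      PySem.List.pySetD_of_nonneg _ _ hy, List.set_set]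

-- A's inner x-loop only touches row y: it equals setting row y to the folded row
theorem innerfold_eq (l : List Int) (grid : List (List Int)) (y : Int) (p : Int → Int)
    (hy : 0 ≤ y) (hx : ∀ x ∈ l, 0 ≤ x) :
    l.foldl (fun g x =>
        PySem.List.pySetD g y
          (PySem.List.pySetD (PySem.List.pyGetD g y []) x (p x))) grid
      = PySem.List.pySetD grid y
          (l.foldl (fun r x => PySem.List.pySetD r x (p x))
            (PySem.List.pyGetD grid y [])) := by
  induction l generalizing grid with
  | nil => simpa using (setD_getD_self grid y hy).symm
  | cons x t ih =>
    rw [List.foldl_cons, List.foldl_cons,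
        ih _ (fun a ha => hx a (List.mem_cons_of_mem _ ha)),
        getD_setD_inner grid y x (p x) hy (hx x (List.mem_cons_self ..)),
        pySetD_overwrite _ _ _ _ hy]

-- folding in-place sets with index-determined values, characterised per index
theorem rowfold_getElem? (l : List Int) (p : Int → Int) (row : List Int) (j : Nat)
    (hl : ∀ i ∈ l, 0 ≤ i ∧ i < (row.length : Int)) :
    (l.foldl (fun r x => PySem.List.pySetD r x (p x)) row)[j]? =
      if (j : Int) ∈ l then some (p j) else row[j]? := by
  induction l generalizing row with
  | nil => simp
  | cons i t ih =>
    have hi := hl i (List.mem_cons_self ..)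
    rw [List.foldl_cons, PySem.List.pySetD_of_nonneg _ _ hi.1,
        ih _ (fun a ha => by simpa using hl a (List.mem_cons_of_mem _ ha))]
    by_cases hjt : (j : Int) ∈ t
    · simp [hjt]
    · rw [if_neg hjt, List.getElem?_set]
      by_cases hji : (j : Int) = i
      · have ht : i.toNat = j := by omega
        rw [if_pos ht, if_pos (by omega), if_pos (by simp [hji]), ← hji]
      · rw [if_neg (by omega), if_neg (by simp [hji, hjt])]

theorem pyGetD_set_ne (g : List (List Int)) (i : Nat) (r : List Int) (j : Nat)
    (h : i ≠ j) :
    PySem.List.pyGetD (g.set i r) (j : Int) [] = PySem.List.pyGetD g (j : Int) [] := by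
  simp [List.getD_eq_getElem?_getD, h]

-- A's outer y-loop sets each row once, from the untouched initial row
theorem outerfold_getElem? (l : List Int) (F : Int → List Int → List Int)
    (grid : List (List Int)) (j : Nat)
    (hnd : l.Nodup) (hl : ∀ i ∈ l, 0 ≤ i ∧ i < (grid.length : Int)) :
    (l.foldl (fun g y =>
        PySem.List.pySetD g y (F y (PySem.List.pyGetD g y []))) grid)[j]? =
      if (j : Int) ∈ l then some (F j (PySem.List.pyGetD grid j [])) else grid[j]? := by
  induction l generalizing grid with
  | nil => simp
  | cons i t ih =>
    have hi := hl i (List.mem_cons_self ..)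
    rw [List.foldl_cons, PySem.List.pySetD_of_nonneg _ _ hi.1,
        ih _ (List.Nodup.of_cons hnd) (fun a ha => by
          simpa using hl a (List.mem_cons_of_mem _ ha))]
    by_cases hjt : (j : Int) ∈ t
    · have hji : (j : Int) ≠ i := by
        rintro rfl; exact (List.nodup_cons.mp hnd).1 hjt
      rw [if_pos hjt, if_pos (List.mem_cons_of_mem _ hjt),
          pyGetD_set_ne _ _ _ _ (by omega)]
    · rw [if_neg hjt, List.getElem?_set]
      by_cases hji : (j : Int) = i
      · have ht : i.toNat = j := by omega
        rw [if_pos ht, if_pos (by omega), if_pos (by simp [hji]), ← hji]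
      · rw [if_neg (by omega), if_neg (by simp [hji, hjt])]

-- ===== VERDICT (by name: the statement is the Claim_ definition above) =====
theorem apply_spec : Claim_equal_apply := by
  intro image w h _ _
  unfold Spec_apply apply apply_alt
  rw [PySem.List.foldl_congr_mem (PySem.List.pyRange 1 (h - 1) 1)
      (fun grid y =>
        (PySem.List.pyRange 1 (w - 1) 1).foldl (fun grid x =>
          PySem.List.pySetD grid y
            (PySem.List.pySetD (PySem.List.pyGetD grid y []) x (pixelA image y x))) grid)
      (fun grid y => PySem.List.pySetD grid y
        ((PySem.List.pyRange 1 (w - 1) 1).foldl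
          (fun r x => PySem.List.pySetD r x (pixelA image y x))
          (PySem.List.pyGetD grid y [])))
      _
      (fun grid y hy => innerfold_eq _ grid y _
        (by have := PySem.List.mem_pyRange_one.mp hy; omega)
        (fun x hx => by have := PySem.List.mem_pyRange_one.mp hx; omega))]
  apply List.ext_getElem?
  intro j
  rw [outerfold_getElem? (PySem.List.pyRange 1 (h - 1) 1)
      (fun y row => (PySem.List.pyRange 1 (w - 1) 1).foldl
        (fun r x => PySem.List.pySetD r x (pixelA image y x)) row)
      _ j (PySem.List.nodup_pyRange_one _ _)
      (fun i hi => by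
        have hm := PySem.List.mem_pyRange_one.mp hi
        have hlen : ((PySem.List.pyRange 0 h 1).map
            (fun _ => (PySem.List.pyRange 0 w 1).map (fun _ => (0 : Int)))).length
            = (h - 0).toNat := by
          rw [List.length_map, PySem.List.length_pyRange_one]
        exact ⟨by omega, by rw [hlen]; omega⟩)]
  by_cases hjh : ((j : Nat) : Int) < h
  · have hjn : j < (h - 0).toNat := by omega
    have hedge : ((PySem.List.pyRange 0 h 1).map
        (fun _ => (PySem.List.pyRange 0 w 1).map (fun _ => (0 : Int))))[j]?
        = some ((PySem.List.pyRange 0 w 1).map (fun _ => (0 : Int))) := by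
      rw [List.getElem?_map, PySem.List.getElem?_pyRange_one, if_pos hjn]; rfl
    have hz : PySem.List.pyGetD ((PySem.List.pyRange 0 h 1).map
        (fun _ => (PySem.List.pyRange 0 w 1).map (fun _ => (0 : Int)))) (j : Int) []
        = (PySem.List.pyRange 0 w 1).map (fun _ => (0 : Int)) := by
      rw [PySem.List.pyGetD_natCast, List.getD_eq_getElem?_getD, hedge]; rfl
    have hrhs : ((PySem.List.pyRange 0 h 1).map (fun y =>
        (PySem.List.pyRange 0 w 1).map (fun x =>
          if 1 ≤ y ∧ y ≤ h - 2 ∧ 1 ≤ x ∧ x ≤ w - 2 then pixelB image y x else 0)))[j]?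
        = some ((PySem.List.pyRange 0 w 1).map (fun x =>
          if 1 ≤ (j : Int) ∧ (j : Int) ≤ h - 2 ∧ 1 ≤ x ∧ x ≤ w - 2
          then pixelB image (j : Int) x else 0)) := by
      rw [List.getElem?_map, PySem.List.getElem?_pyRange_one, if_pos hjn]
      simp only [Option.map_some, zero_add]
    rw [hrhs]
    by_cases hjy : (j : Int) ∈ PySem.List.pyRange 1 (h - 1) 1
    · have hy' := PySem.List.mem_pyRange_one.mp hjy
      rw [if_pos hjy, hz]
      refine congrArg some ?_
      apply List.ext_getElem?
      intro k
      rw [rowfold_getElem? (PySem.List.pyRange 1 (w - 1) 1)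
          (fun x => pixelA image (j : Int) x) _ k
          (fun i hi => by
            have hm := PySem.List.mem_pyRange_one.mp hi
            have hlen : ((PySem.List.pyRange 0 w 1).map
                (fun _ => (0 : Int))).length = (w - 0).toNat := by
              rw [List.length_map, PySem.List.length_pyRange_one]
            exact ⟨by omega, by rw [hlen]; omega⟩)]
      by_cases hkx : (k : Int) ∈ PySem.List.pyRange 1 (w - 1) 1
      · have hx' := PySem.List.mem_pyRange_one.mp hkx
        rw [if_pos hkx, pixel_eq, List.getElem?_map, PySem.List.getElem?_pyRange_one,
            if_pos (by omega : k < (w - 0).toNat)]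
        simp only [Option.map_some, zero_add]
        rw [if_pos ⟨by omega, by omega, by omega, by omega⟩]
      · rw [if_neg hkx, List.getElem?_map, List.getElem?_map,
            PySem.List.getElem?_pyRange_one]
        by_cases hkw : k < (w - 0).toNat
        · rw [if_pos hkw]
          simp only [Option.map_some, zero_add]
          rw [if_neg (fun hc =>
            hkx (PySem.List.mem_pyRange_one.mpr ⟨hc.2.2.1, by omega⟩))]
        · rw [if_neg hkw]
          rfl
    · rw [if_neg hjy, hedge]
      refine congrArg some ?_
      apply List.map_congr_left
      intro x _
      exact (if_neg (fun hc =>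
        hjy (PySem.List.mem_pyRange_one.mpr ⟨hc.1, by omega⟩))).symm
  · have hjy : ¬((j : Int) ∈ PySem.List.pyRange 1 (h - 1) 1) := fun hc => by
      have := PySem.List.mem_pyRange_one.mp hc; omega
    rw [if_neg hjy, List.getElem?_map, List.getElem?_map,
        PySem.List.getElem?_pyRange_one, if_neg (by omega : ¬ j < (h - 0).toNat)]
    rfl
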